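-- pv_equiv track=rewrite | github.com/kamilGie/ASRT-WDI | Zestaw_1:_Proste_programy_z_pętlami/57/Rozwiązania/main.py | Zadanie_57
-- ===== SOURCE A (Python) =====
-- def is_prime(x):
--     if x < 2:
--         return False
--     if x < 4:
--         return True
--     if x % 2 == 0 or x % 3 == 0:
--         return False
--     divisor = 5
--     while divisor * divisor <= x:
--         if x % divisor == 0 or x % (divisor + 2) == 0:
--             return False
--         divisor += 6
--     return True
--
-- def iloczyn_cyfr(liczba, podstawa):
--     iloczyn = 1
--     while liczba > 0:
--         cyfra = liczba % podstawa
--         liczba //= podstawa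
--         iloczyn *= cyfra
--         if iloczyn == 0:
--             break
--     return iloczyn
--
-- def liczba_cyfr(liczba):
--     licznik_cyfr = 0
--     if liczba == 0:
--         return 1
--     while liczba > 0:
--         liczba //= 10
--         licznik_cyfr += 1
--     return licznik_cyfr
--
-- def rotacja_w_lewo(liczba):
--     licznik_cyfr = liczba_cyfr(liczba)
--     if licznik_cyfr <= 1:
--         return liczba
--     potega_dziesiatki = 10 ** (licznik_cyfr - 1)
--     najwazniejsza = liczba // potega_dziesiatki
--     liczba %= potega_dziesiatki
--     return liczba * 10 + najwazniejsza
--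
-- def Zadanie_57(N):
--     licznik_cyfr = liczba_cyfr(N)
--     podstawa = 2
--     while podstawa <= 16:
--         licznik_rotacji = 0
--         obrocona_liczba = N
--         while licznik_rotacji < licznik_cyfr:
--             if is_prime(iloczyn_cyfr(obrocona_liczba, podstawa)):
--                 return podstawa
--             obrocona_liczba = rotacja_w_lewo(obrocona_liczba)
--             licznik_rotacji += 1
--         podstawa += 1
--     return None
-- ===== SOURCE B (Python) =====
-- PRIME_DIGITS = (2, 3, 5, 7, 11, 13)
--
-- def ma_pierwszy_iloczyn(r, b):
--     # digit product of r in base b is prime  <=>  exactly one digit is not 1 and that digit is prime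
--     nieoczko = 0
--     while r > 0:
--         c = r % b
--         r //= b
--         if c != 1:
--             if nieoczko == 1 or c not in PRIME_DIGITS:
--                 return False
--             nieoczko = 1
--     return nieoczko == 1
--
-- def pierwsza_baza(x):
--     for b in range(2, 17):
--         if ma_pierwszy_iloczyn(x, b):
--             return b
--     return None
--
-- def Zadanie_57(N):
--     best = None
--     x = N
--     p = 1
--     while p * 10 <= N:
--         p *= 10
--     while p >= 1:
--         b = pierwsza_baza(x)
--         if b is not None and (best is None or b < best):
--             best = b
--         q = 1
--         while q * 10 <= x:
--             q *= 10
--         x = (x % q) * 10 + x // q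
--         p //= 10
--     return best
-- ===== Notes on version B (the rewrite author's own statement) =====
-- stated objective: alternative
-- what changed: B eliminates the primality test entirely by the number-theoretic fact that a digit product is prime iff exactly one base-b digit differs from 1 and that digit is one of the primes 2,3,5,7,11,13 (< 16), checked in one scan over the digits; it also inverts the loop nesting (rotations outer, bases inner, keeping the minimum base found) and locates the leading-digit power of 10 directly instead of counting digits.
import Mathlib
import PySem

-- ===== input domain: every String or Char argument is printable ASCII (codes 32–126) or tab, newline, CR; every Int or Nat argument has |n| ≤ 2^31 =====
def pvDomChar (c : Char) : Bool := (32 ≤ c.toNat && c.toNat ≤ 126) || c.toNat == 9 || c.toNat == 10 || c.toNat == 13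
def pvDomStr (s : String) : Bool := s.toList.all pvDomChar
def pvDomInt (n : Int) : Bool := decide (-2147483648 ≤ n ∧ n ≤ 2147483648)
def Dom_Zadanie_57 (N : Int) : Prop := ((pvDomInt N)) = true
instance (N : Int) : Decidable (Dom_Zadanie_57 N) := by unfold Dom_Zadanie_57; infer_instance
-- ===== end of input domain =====

-- B drops A's trial-division primality test (digit product is prime iff exactly one digit ≠ 1 and
-- that digit is a prime < 16), swaps the loop nesting (rotations outer, bases inner, tracking the
-- minimum base) and finds the rotation's power of 10 directly; same return value, no speed claim.

-- Termination helper for the //-loops (cited by name in decreasing_by).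
theorem pvFloordivLtSelf (x b : Int) (hx : 0 < x) (hb : 2 ≤ b) :
    (PySem.Int.floordiv x b).toNat < x.toNat := by
  rw [PySem.Int.floordiv_eq_ediv_of_pos (by omega)]
  have h2 : 0 ≤ x / b := Int.ediv_nonneg (by omega) (by omega)
  have h1 : x / b < x := by
    have hx' : x = (x.toNat : Int) := by omega
    have hb' : b = (b.toNat : Int) := by omega
    rw [hx', hb', ← Int.natCast_div]
    exact_mod_cast Nat.div_lt_self (by omega) (by omega)
  omega

-- ===== PORT A =====
def isPrimeLoop (x divisor : Int) : Bool :=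
  if h : divisor * divisor ≤ x then
    if PySem.Int.mod x divisor == 0 || PySem.Int.mod x (divisor + 2) == 0 then false
    else isPrimeLoop x (divisor + 6)
  else true
termination_by (x + 1 - divisor).toNat
decreasing_by
  have hd2 : 2 * divisor - 1 ≤ x := by nlinarith [sq_nonneg (divisor - 1)]
  have hd0 : 0 ≤ x := by nlinarith [sq_nonneg divisor]
  omega

def is_prime (x : Int) : Bool :=
  if x < 2 then false
  else if x < 4 then true
  else if PySem.Int.mod x 2 == 0 || PySem.Int.mod x 3 == 0 then false
  else isPrimeLoop x 5

-- guard 'podstawa ≤ 1': Python's while would loop forever there; Zadanie_57 only calls bases 2..16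
def iloczynGo (liczba podstawa iloczyn : Int) : Int :=
  if hp : podstawa ≤ 1 then iloczyn
  else if hl : 0 < liczba then
    let cyfra := PySem.Int.mod liczba podstawa
    let reszta := PySem.Int.floordiv liczba podstawa
    let nowy := iloczyn * cyfra
    if nowy == 0 then nowy else iloczynGo reszta podstawa nowy
  else iloczyn
termination_by liczba.toNat
decreasing_by exact pvFloordivLtSelf _ _ hl (by omega)

def iloczyn_cyfr (liczba podstawa : Int) : Int := iloczynGo liczba podstawa 1

def liczbaCyfrGo (liczba licznik_cyfr : Int) : Int :=
  if h : 0 < liczba then liczbaCyfrGo (PySem.Int.floordiv liczba 10) (licznik_cyfr + 1)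
  else licznik_cyfr
termination_by liczba.toNat
decreasing_by exact pvFloordivLtSelf _ _ h (by omega)

def liczba_cyfr (liczba : Int) : Int :=
  if liczba == 0 then 1 else liczbaCyfrGo liczba 0

def rotacja_w_lewo (liczba : Int) : Int :=
  let licznik_cyfr := liczba_cyfr liczba
  if licznik_cyfr ≤ 1 then liczba
  else
    let potega_dziesiatki : Int := (10 : Int) ^ (licznik_cyfr - 1).toNat
    let najwazniejsza := PySem.Int.floordiv liczba potega_dziesiatki
    let reszta := PySem.Int.mod liczba potega_dziesiatki
    reszta * 10 + najwazniejsza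

def zadanieInner (licznik_cyfr podstawa licznik_rotacji obrocona_liczba : Int) : Option Int :=
  if h : licznik_rotacji < licznik_cyfr then
    if is_prime (iloczyn_cyfr obrocona_liczba podstawa) then some podstawa
    else zadanieInner licznik_cyfr podstawa (licznik_rotacji + 1) (rotacja_w_lewo obrocona_liczba)
  else none
termination_by (licznik_cyfr - licznik_rotacji).toNat
decreasing_by omega

def zadanieOuter (licznik_cyfr N podstawa : Int) : Option Int :=
  if h : podstawa ≤ 16 then
    match zadanieInner licznik_cyfr podstawa 0 N with
    | some w => some w
    | none => zadanieOuter licznik_cyfr N (podstawa + 1)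
  else none
termination_by (17 - podstawa).toNat
decreasing_by omega

def Zadanie_57 (N : Int) : Option Int := zadanieOuter (liczba_cyfr N) N 2

-- ===== PORT B =====
-- 'c not in PRIME_DIGITS' ported as the equality chain against the tuple's six elements.
-- guard 'b ≤ 1': Python's while would loop forever there; B only calls bases 2..16.
def pvMaGo (r b nie : Int) : Bool :=
  if hb : b ≤ 1 then nie == 1
  else if hr : 0 < r then
    let c := PySem.Int.mod r b
    if c != 1 then
      if nie == 1 || !(c == 2 || c == 3 || c == 5 || c == 7 || c == 11 || c == 13) then false
      else pvMaGo (PySem.Int.floordiv r b) b 1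
    else pvMaGo (PySem.Int.floordiv r b) b nie
  else nie == 1
termination_by r.toNat
decreasing_by
  · exact pvFloordivLtSelf _ _ hr (by omega)
  · exact pvFloordivLtSelf _ _ hr (by omega)

def ma_pierwszy_iloczyn (r b : Int) : Bool := pvMaGo r b 0

def pierwszaGo (x b : Int) : Option Int :=
  if h : b ≤ 16 then
    if ma_pierwszy_iloczyn x b then some b else pierwszaGo x (b + 1)
  else none
termination_by (17 - b).toNat
decreasing_by omega

def pierwsza_baza (x : Int) : Option Int := pierwszaGo x 2

-- guard '1 ≤ q': q starts at 1 and is only multiplied by 10 (invariant of the Python loop)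
def potegaGo (q x : Int) : Int :=
  if h : 1 ≤ q ∧ q * 10 ≤ x then potegaGo (q * 10) x else q
termination_by (x - q).toNat
decreasing_by omega

def altUpdate (b best : Option Int) : Option Int :=
  match b with
  | none => best
  | some bb =>
    match best with
    | none => some bb
    | some be => if bb < be then some bb else best

def altOuter (p x : Int) (best : Option Int) : Option Int :=
  if h : 1 ≤ p then
    altOuter (PySem.Int.floordiv p 10)
      (PySem.Int.mod x (potegaGo 1 x) * 10 + PySem.Int.floordiv x (potegaGo 1 x))
      (altUpdate (pierwsza_baza x) best)
  else best
termination_by p.toNat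
decreasing_by exact pvFloordivLtSelf _ _ (by omega) (by omega)

def Zadanie_57_alt (N : Int) : Option Int := altOuter (potegaGo 1 N) N none

-- ===== PRECONDITION & SPEC =====
def Spec_Zadanie_57 (N : Int) (out : Option Int) : Prop := out = Zadanie_57_alt N
instance (N : Int) (out : Option Int) : Decidable (Spec_Zadanie_57 N out) := by unfold Spec_Zadanie_57; infer_instance

-- ===== CLAIM (what is proved, stated in full; the proofs are below) =====
def Claim_equal_Zadanie_57 : Prop := ∀ (N : Int), Dom_Zadanie_57 N → Spec_Zadanie_57 N (Zadanie_57 N)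

-- ===== LEMMAS AND PROOFS =====

-- A-side reshaping: the rotation table A walks per base, as a list.
def budujRotacje (x : Int) : Nat → List Int
  | 0 => []
  | n + 1 => x :: budujRotacje (rotacja_w_lewo x) n

theorem inner_eq : ∀ (m : Nat) (d b j x : Int), (d - j).toNat = m →
    zadanieInner d b j x =
      (if (budujRotacje x m).any (fun r => is_prime (iloczyn_cyfr r b)) then some b else none) := by
  intro m
  induction m with
  | zero =>
    intro d b j x h
    rw [zadanieInner]
    have hj : ¬ j < d := by omega
    simp [hj, budujRotacje]
  | succ m ih =>
    intro d b j x h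
    rw [zadanieInner]
    have hj : j < d := by omega
    simp only [hj, dif_pos, budujRotacje, List.any_cons]
    by_cases hp : is_prime (iloczyn_cyfr x b)
    · simp [hp]
    · have hb : is_prime (iloczyn_cyfr x b) = false := by simpa using hp
      simp only [hb, Bool.false_or, Bool.false_eq_true, if_false]
      exact ih d b (j + 1) (rotacja_w_lewo x) (by omega)

theorem outer_eq : ∀ (m : Nat) (d N b : Int), (17 - b).toNat = m →
    zadanieOuter d N b =
      (PySem.List.pyRange b 17 1).find?
        (fun pb => (budujRotacje N d.toNat).any (fun r => is_prime (iloczyn_cyfr r pb))) := by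
  intro m
  induction m with
  | zero =>
    intro d N b h
    rw [zadanieOuter]
    have hb : ¬ b ≤ 16 := by omega
    have hr : PySem.List.pyRange b 17 1 = [] := PySem.List.pyRange_one_eq_nil (by omega)
    simp [hb, hr]
  | succ m ih =>
    intro d N b h
    rw [zadanieOuter]
    have hb : b ≤ 16 := by omega
    have hr : PySem.List.pyRange b 17 1 = b :: PySem.List.pyRange (b + 1) 17 1 :=
      PySem.List.pyRange_one_cons (by omega)
    rw [hr]
    simp only [hb, dif_pos, List.find?_cons]
    rw [inner_eq d.toNat d b 0 N (by omega)]
    by_cases hp : (budujRotacje N d.toNat).any (fun r => is_prime (iloczyn_cyfr r b))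
    · simp [hp]
    · have hp' : ((budujRotacje N d.toNat).any (fun r => is_prime (iloczyn_cyfr r b))) = false := by
        simpa using hp
      simp only [hp', Bool.false_eq_true, if_false]
      exact ih d N (b + 1) (by omega)

-- trial division returns false whenever a witness divisor q ≡ ±1 (mod 6) with q² ≤ x lies ahead
theorem isPrimeLoop_false : ∀ (fuel : Nat) (x divisor q : Int), (x + 1 - divisor).toNat ≤ fuel →
    divisor % 6 = 5 → 5 ≤ divisor → divisor ≤ q → q ∣ x → q * q ≤ x →
    (q % 6 = 1 ∨ q % 6 = 5) → isPrimeLoop x divisor = false := by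
  intro fuel
  induction fuel with
  | zero =>
    intro x divisor q hf h6 h5 hdq hdvd hqq hq6
    exfalso
    have hdd : divisor * divisor ≤ x := le_trans (by nlinarith) hqq
    have h1 : divisor ≤ divisor * divisor := by nlinarith
    omega
  | succ n ih =>
    intro x divisor q hf h6 h5 hdq hdvd hqq hq6
    rw [isPrimeLoop]
    have hdd : divisor * divisor ≤ x := le_trans (by nlinarith) hqq
    have h1 : divisor ≤ divisor * divisor := by nlinarith
    rw [dif_pos hdd]
    by_cases hq1 : q = divisor
    · have hm : PySem.Int.mod x divisor = 0 :=
        (PySem.Int.mod_eq_zero_iff_dvd x divisor).mpr (hq1 ▸ hdvd)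
      rw [if_pos (by rw [hm]; simp)]
    · by_cases hq2 : q = divisor + 2
      · have hm : PySem.Int.mod x (divisor + 2) = 0 :=
          (PySem.Int.mod_eq_zero_iff_dvd x (divisor + 2)).mpr (hq2 ▸ hdvd)
        rw [if_pos (by rw [hm]; simp)]
      · by_cases hbr : (PySem.Int.mod x divisor == 0 || PySem.Int.mod x (divisor + 2) == 0) = true
        · rw [if_pos hbr]
        · rw [if_neg (by simpa using hbr)]
          exact ih x (divisor + 6) q (by omega) (by omega) (by omega) (by omega) hdvd hqq hq6

theorem is_prime_comp (a c : Int) (ha : 2 ≤ a) (hc : 2 ≤ c) : is_prime (a * c) = false := by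
  have hx4 : 4 ≤ a * c := by nlinarith
  rw [is_prime, if_neg (by omega), if_neg (by omega)]
  by_cases hbr : (PySem.Int.mod (a * c) 2 == 0 || PySem.Int.mod (a * c) 3 == 0) = true
  · rw [if_pos hbr]
  · rw [if_neg (by simpa using hbr)]
    have hbr2 : ¬ PySem.Int.mod (a * c) 2 = 0 := by
      intro h; apply hbr; rw [h]; simp
    have hbr3 : ¬ PySem.Int.mod (a * c) 3 = 0 := by
      intro h; apply hbr; rw [h]; simp
    have h2 : ¬ (2 : Int) ∣ a * c := fun hd => hbr2 ((PySem.Int.mod_eq_zero_iff_dvd _ _).mpr hd)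
    have h3 : ¬ (3 : Int) ∣ a * c := fun hd => hbr3 ((PySem.Int.mod_eq_zero_iff_dvd _ _).mpr hd)
    have hn : ((a * c).natAbs : Int) = a * c := Int.natAbs_of_nonneg (by omega)
    have hn4 : 4 ≤ (a * c).natAbs := by omega
    have hqp : (a * c).natAbs.minFac.Prime := Nat.minFac_prime (by omega)
    have hqd : (a * c).natAbs.minFac ∣ (a * c).natAbs := Nat.minFac_dvd _
    have hna : (a * c).natAbs = a.natAbs * c.natAbs := Int.natAbs_mul a c
    have haa : (a.natAbs : Int) = a := Int.natAbs_of_nonneg (by omega)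
    have hcc : (c.natAbs : Int) = c := Int.natAbs_of_nonneg (by omega)
    have hqa : (a * c).natAbs.minFac ≤ a.natAbs :=
      Nat.minFac_le_of_dvd (by omega) ⟨c.natAbs, hna⟩
    have hqc : (a * c).natAbs.minFac ≤ c.natAbs :=
      Nat.minFac_le_of_dvd (by omega) ⟨a.natAbs, by rw [hna]; ring⟩
    set q := (a * c).natAbs.minFac with hqdef
    have hqq : q * q ≤ (a * c).natAbs := le_trans (Nat.mul_le_mul hqa hqc) (le_of_eq hna.symm)
    have hqdvd : (q : Int) ∣ a * c := by
      rw [← hn]; exact_mod_cast hqd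
    have hq2 : q ≠ 2 := by
      intro h; apply h2; have h' := hqdvd; rw [h] at h'; exact_mod_cast h'
    have hq3 : q ≠ 3 := by
      intro h; apply h3; have h' := hqdvd; rw [h] at h'; exact_mod_cast h'
    have hq4 : q ≠ 4 := by
      intro h; rw [h] at hqp; norm_num at hqp
    have hq5 : 5 ≤ q := by
      have := hqp.two_le; omega
    have hnd2 : ¬ 2 ∣ q := by
      intro hd; rcases hqp.eq_one_or_self_of_dvd 2 hd with h | h <;> omega
    have hnd3 : ¬ 3 ∣ q := by
      intro hd; rcases hqp.eq_one_or_self_of_dvd 3 hd with h | h <;> omega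
    have hq6 : q % 6 = 1 ∨ q % 6 = 5 := by omega
    have hqqI : (q : Int) * (q : Int) ≤ a * c := by
      have h' : ((q * q : Nat) : Int) ≤ (((a * c).natAbs : Nat) : Int) := by exact_mod_cast hqq
      push_cast at h'; omega
    exact isPrimeLoop_false (a * c + 1 - 5).toNat (a * c) 5 (q : Int) le_rfl (by norm_num)
      (by norm_num) (by exact_mod_cast hq5) hqdvd hqqI (by omega)

theorem iloczynGo_dead : ∀ (fuel : Nat) (x b p : Int), x.toNat ≤ fuel → 2 ≤ b →
    (∃ a c, 2 ≤ a ∧ 2 ≤ c ∧ p = a * c) → is_prime (iloczynGo x b p) = false := by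
  intro fuel
  induction fuel with
  | zero =>
    rintro x b p hf hb ⟨a, c, ha, hc, hp⟩
    rw [iloczynGo, dif_neg (by omega), dif_neg (by omega)]
    exact hp ▸ is_prime_comp a c ha hc
  | succ n ih =>
    rintro x b p hf hb ⟨a, c, ha, hc, hp⟩
    by_cases hx : 0 < x
    · by_cases hz : p * PySem.Int.mod x b = 0
      · have h0 : iloczynGo x b p = 0 := by
          rw [iloczynGo, dif_neg (show ¬ b ≤ 1 by omega), dif_pos hx]
          simp [hz]
        rw [h0]; decide
      · have hstep : iloczynGo x b p = iloczynGo (PySem.Int.floordiv x b) b (p * PySem.Int.mod x b) := by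
          rw [iloczynGo, dif_neg (show ¬ b ≤ 1 by omega), dif_pos hx]
          simp [hz]
        rw [hstep]
        have hfd : (PySem.Int.floordiv x b).toNat ≤ n := by
          have := pvFloordivLtSelf x b hx hb; omega
        have hm0 : 0 ≤ PySem.Int.mod x b := PySem.Int.mod_nonneg x (by omega)
        have hm1 : 1 ≤ PySem.Int.mod x b := by
          rcases lt_or_ge 0 (PySem.Int.mod x b) with h | h
          · omega
          · exfalso; apply hz
            have h' : PySem.Int.mod x b = 0 := by omega
            rw [h', mul_zero]
        exact ih _ b _ hfd hb ⟨a, c * PySem.Int.mod x b, ha, by nlinarith, by rw [hp]; ring⟩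
    · rw [iloczynGo, dif_neg (show ¬ b ≤ 1 by omega), dif_neg hx]
      exact hp ▸ is_prime_comp a c ha hc

theorem isPrimeLoop_lit (x : Int) (hx : x < 25) : isPrimeLoop x 5 = true := by
  rw [isPrimeLoop, dif_neg (by omega)]

theorem is_prime_digit (p : Int)
    (hp : p = 2 ∨ p = 3 ∨ p = 5 ∨ p = 7 ∨ p = 11 ∨ p = 13) : is_prime p = true := by
  rcases hp with h | h | h | h | h | h <;> subst h
  · decide
  · decide
  · unfold is_prime; rw [isPrimeLoop_lit 5 (by norm_num)]; decide
  · unfold is_prime; rw [isPrimeLoop_lit 7 (by norm_num)]; decide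
  · unfold is_prime; rw [isPrimeLoop_lit 11 (by norm_num)]; decide
  · unfold is_prime; rw [isPrimeLoop_lit 13 (by norm_num)]; decide

-- the two scans agree when the value has no digits left
theorem st_base (x b : Int) (hx : ¬ 0 < x) (hb : 2 ≤ b) :
    (is_prime (iloczynGo x b 1) = pvMaGo x b 0) ∧
    (∀ p : Int, (p = 2 ∨ p = 3 ∨ p = 5 ∨ p = 7 ∨ p = 11 ∨ p = 13) →
      is_prime (iloczynGo x b p) = pvMaGo x b 1) := by
  constructor
  · rw [iloczynGo, dif_neg (by omega), dif_neg hx, pvMaGo, dif_neg (by omega), dif_neg hx]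
    decide
  · intro p hp
    rw [iloczynGo, dif_neg (by omega), dif_neg hx, pvMaGo, dif_neg (by omega), dif_neg hx]
    rw [is_prime_digit p hp]
    decide

-- central invariant: A's running product is prime iff B's digit-pattern scan accepts
theorem st : ∀ (fuel : Nat) (x b : Int), x.toNat ≤ fuel → 2 ≤ b → b ≤ 16 →
    (is_prime (iloczynGo x b 1) = pvMaGo x b 0) ∧
    (∀ p : Int, (p = 2 ∨ p = 3 ∨ p = 5 ∨ p = 7 ∨ p = 11 ∨ p = 13) →
      is_prime (iloczynGo x b p) = pvMaGo x b 1) := by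
  intro fuel
  induction fuel with
  | zero =>
    intro x b hf h2 h16
    exact st_base x b (by omega) h2
  | succ n ih =>
    intro x b hf h2 h16
    by_cases hx : 0 < x
    · have hfd : (PySem.Int.floordiv x b).toNat ≤ n := by
        have := pvFloordivLtSelf x b hx h2; omega
      obtain ⟨ih1, ih2⟩ := ih (PySem.Int.floordiv x b) b hfd h2 h16
      obtain ⟨c, hc⟩ : ∃ c, PySem.Int.mod x b = c := ⟨_, rfl⟩
      have hc0' : 0 ≤ PySem.Int.mod x b := PySem.Int.mod_nonneg x (by omega)
      have hcb' : PySem.Int.mod x b < b := PySem.Int.mod_lt x (by omega)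
      have hc0 : 0 ≤ c := by omega
      have hc15 : c ≤ 15 := by omega
      constructor
      · rw [iloczynGo, dif_neg (show ¬ b ≤ 1 by omega), dif_pos hx,
            pvMaGo, dif_neg (show ¬ b ≤ 1 by omega), dif_pos hx]
        simp only [hc, one_mul]
        interval_cases c
        · simp; decide
        · simpa using ih1
        · simpa using ih2 2 (by norm_num)
        · simpa using ih2 3 (by norm_num)
        · simp
          exact iloczynGo_dead n _ b 4 hfd h2 ⟨2, 2, by norm_num, by norm_num, by norm_num⟩
        · simpa using ih2 5 (by norm_num)
        · simp
          exact iloczynGo_dead n _ b 6 hfd h2 ⟨2, 3, by norm_num, by norm_num, by norm_num⟩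
        · simpa using ih2 7 (by norm_num)
        · simp
          exact iloczynGo_dead n _ b 8 hfd h2 ⟨2, 4, by norm_num, by norm_num, by norm_num⟩
        · simp
          exact iloczynGo_dead n _ b 9 hfd h2 ⟨3, 3, by norm_num, by norm_num, by norm_num⟩
        · simp
          exact iloczynGo_dead n _ b 10 hfd h2 ⟨2, 5, by norm_num, by norm_num, by norm_num⟩
        · simpa using ih2 11 (by norm_num)
        · simp
          exact iloczynGo_dead n _ b 12 hfd h2 ⟨2, 6, by norm_num, by norm_num, by norm_num⟩
        · simpa using ih2 13 (by norm_num)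
        · simp
          exact iloczynGo_dead n _ b 14 hfd h2 ⟨2, 7, by norm_num, by norm_num, by norm_num⟩
        · simp
          exact iloczynGo_dead n _ b 15 hfd h2 ⟨3, 5, by norm_num, by norm_num, by norm_num⟩
      · intro p hp
        rw [iloczynGo, dif_neg (show ¬ b ≤ 1 by omega), dif_pos hx,
            pvMaGo, dif_neg (show ¬ b ≤ 1 by omega), dif_pos hx]
        simp only [hc]
        have hp2 : 2 ≤ p := by rcases hp with h | h | h | h | h | h <;> omega
        have hp0 : ¬ p = 0 := by omega
        by_cases hc1 : c = 1
        · subst hc1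
          simpa [hp0] using ih2 p hp
        · by_cases hcz : c = 0
          · subst hcz
            simp
            decide
          · have hc2 : 2 ≤ c := by omega
            have hne : p * c ≠ 0 := by
              have := mul_pos (show (0 : Int) < p by omega) (show (0 : Int) < c by omega)
              omega
            simp [hne, hc1]
            exact iloczynGo_dead n _ b (p * c) hfd h2 ⟨p, c, hp2, hc2, rfl⟩
    · exact st_base x b hx h2

theorem test_eq (x b : Int) (h2 : 2 ≤ b) (h16 : b ≤ 16) :
    is_prime (iloczyn_cyfr x b) = ma_pierwszy_iloczyn x b :=
  (st x.toNat x b le_rfl h2 h16).1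

theorem pierwszaGo_eq : ∀ (m : Nat) (x b : Int), (17 - b).toNat = m →
    pierwszaGo x b = (PySem.List.pyRange b 17 1).find? (fun bb => ma_pierwszy_iloczyn x bb) := by
  intro m
  induction m with
  | zero =>
    intro x b h
    rw [pierwszaGo]
    have hb : ¬ b ≤ 16 := by omega
    have hr : PySem.List.pyRange b 17 1 = [] := PySem.List.pyRange_one_eq_nil (by omega)
    simp [hb, hr]
  | succ m ih =>
    intro x b h
    rw [pierwszaGo]
    have hb : b ≤ 16 := by omega
    have hr : PySem.List.pyRange b 17 1 = b :: PySem.List.pyRange (b + 1) 17 1 :=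
      PySem.List.pyRange_one_cons (by omega)
    rw [hr]
    simp only [hb, dif_pos, List.find?_cons]
    by_cases hp : ma_pierwszy_iloczyn x b
    · simp [hp]
    · have hp' : ma_pierwszy_iloczyn x b = false := by simpa using hp
      simp only [hp', Bool.false_eq_true, if_false]
      exact ih x (b + 1) (by omega)

theorem potega_spec : ∀ (fuel : Nat) (q x : Int), (x - q).toNat ≤ fuel → 1 ≤ q →
    ∃ k : Nat, potegaGo q x = q * 10 ^ k ∧ x < q * 10 ^ k * 10 ∧ (k = 0 ∨ q * 10 ^ k ≤ x) := by
  intro fuel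
  induction fuel with
  | zero =>
    intro q x hf h1
    rw [potegaGo]
    have hg : ¬ (1 ≤ q ∧ q * 10 ≤ x) := by omega
    rw [dif_neg hg]
    exact ⟨0, by ring, by simp; omega, Or.inl rfl⟩
  | succ n ih =>
    intro q x hf h1
    rw [potegaGo]
    by_cases hg : 1 ≤ q ∧ q * 10 ≤ x
    · rw [dif_pos hg]
      obtain ⟨k, hpo, hub, hlb⟩ := ih (q * 10) x (by omega) (by omega)
      refine ⟨k + 1, by rw [hpo]; ring, ?_, Or.inr ?_⟩
      · rw [show q * 10 ^ (k + 1) * 10 = q * 10 * 10 ^ k * 10 from by ring]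
        exact hub
      · rcases hlb with h | h
        · subst h; simpa using hg.2
        · rw [show q * 10 ^ (k + 1) = q * 10 * 10 ^ k from by ring]
          exact h
    · rw [dif_neg hg]
      exact ⟨0, by ring, by simp; omega, Or.inl rfl⟩

theorem lc_spec : ∀ (fuel : Nat) (x cacc : Int), x.toNat ≤ fuel → 1 ≤ x →
    ∃ k : Nat, liczbaCyfrGo x cacc = cacc + (k + 1) ∧ 10 ^ k ≤ x ∧ x < 10 ^ (k + 1) := by
  intro fuel
  induction fuel with
  | zero =>
    intro x cacc hf h1
    exfalso; omega
  | succ n ih =>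
    intro x cacc hf h1
    have hdecomp := PySem.Int.floordiv_mul_add_mod x 10
    have hm0 : 0 ≤ PySem.Int.mod x 10 := PySem.Int.mod_nonneg x (by norm_num)
    have hm1 : PySem.Int.mod x 10 < 10 := PySem.Int.mod_lt x (by norm_num)
    rw [liczbaCyfrGo, dif_pos (by omega)]
    by_cases hx10 : x < 10
    · have hfl0 : PySem.Int.floordiv x 10 = 0 := by omega
      rw [hfl0, liczbaCyfrGo, dif_neg (by omega)]
      refine ⟨0, by push_cast; ring, by norm_num; omega, by norm_num; omega⟩
    · have hfl1 : 1 ≤ PySem.Int.floordiv x 10 := by omega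
      have hfd : (PySem.Int.floordiv x 10).toNat ≤ n := by
        have := pvFloordivLtSelf x 10 (by omega) (by omega); omega
      obtain ⟨k, hrec, hlo, hhi⟩ := ih _ (cacc + 1) hfd hfl1
      refine ⟨k + 1, by rw [hrec]; push_cast; ring, ?_, ?_⟩
      · rw [pow_succ]
        have h10 : (10 : Int) ^ k * 10 ≤ PySem.Int.floordiv x 10 * 10 := by linarith
        linarith
      · rw [show k + 1 + 1 = (k + 1) + 1 from rfl, pow_succ]
        have h5 : PySem.Int.floordiv x 10 + 1 ≤ 10 ^ (k + 1) := hhi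
        have h10 : (PySem.Int.floordiv x 10 + 1) * 10 ≤ 10 ^ (k + 1) * 10 := by linarith
        linarith

theorem pow_window_uniq (x : Int) (k j : Nat) (hk1 : 10 ^ k ≤ x) (hk2 : x < 10 ^ (k + 1))
    (hj1 : 10 ^ j ≤ x) (hj2 : x < 10 ^ (j + 1)) : k = j := by
  by_contra hne
  rcases Nat.lt_or_ge k j with h | h
  · have : (10 : Int) ^ (k + 1) ≤ 10 ^ j := pow_le_pow_right₀ (by norm_num) (by omega)
    linarith
  · have : (10 : Int) ^ (j + 1) ≤ 10 ^ k := pow_le_pow_right₀ (by norm_num) (by omega)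
    linarith

theorem liczba_cyfr_eq (x : Int) (k : Nat) (h1 : 1 ≤ x) (hlo : 10 ^ k ≤ x)
    (hhi : x < 10 ^ (k + 1)) : liczba_cyfr x = (k : Int) + 1 := by
  obtain ⟨j, hj, hjlo, hjhi⟩ := lc_spec x.toNat x 0 le_rfl h1
  have hkj : k = j := pow_window_uniq x k j hlo hhi hjlo hjhi
  rw [liczba_cyfr, if_neg (by simp; omega), hj, hkj]
  push_cast; ring

theorem rot_eq (x : Int) :
    PySem.Int.mod x (potegaGo 1 x) * 10 + PySem.Int.floordiv x (potegaGo 1 x) = rotacja_w_lewo x := by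
  by_cases hx10 : x < 10
  · have hp : potegaGo 1 x = 1 := by rw [potegaGo, dif_neg (by omega)]
    have hm : PySem.Int.mod x 1 = 0 := by
      have h0 := PySem.Int.mod_nonneg x (show (0 : Int) < 1 by norm_num)
      have h1 := PySem.Int.mod_lt x (show (0 : Int) < 1 by norm_num)
      omega
    have hd : PySem.Int.floordiv x 1 = x := by
      have := PySem.Int.floordiv_mul_add_mod x 1
      omega
    rw [hp, hm, hd]
    have hlc : liczba_cyfr x ≤ 1 := by
      rw [liczba_cyfr]
      by_cases h0 : x = 0
      · simp [h0]
      · rw [if_neg (by simpa using h0)]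
        by_cases hpos : 1 ≤ x
        · obtain ⟨k, hk, hlo, hhi⟩ := lc_spec x.toNat x 0 le_rfl hpos
          have hk0 : k = 0 := by
            by_contra hne
            have h1 : (10 : Int) ^ 1 ≤ 10 ^ k := pow_le_pow_right₀ (by norm_num) (by omega)
            simp at h1; linarith
          rw [hk, hk0]; norm_num
        · rw [liczbaCyfrGo, dif_neg (by omega)]; omega
    rw [rotacja_w_lewo]
    simp only [if_pos hlc]
    ring
  · obtain ⟨k, hpo, hub, hlb⟩ := potega_spec (x - 1).toNat 1 x (by omega) le_rfl
    simp only [one_mul] at hpo hub hlb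
    have hklo : (10 : Int) ^ k ≤ x := by
      rcases hlb with h | h
      · subst h; simp at hub ⊢; omega
      · exact h
    have hub' : x < 10 ^ (k + 1) := by rw [pow_succ]; exact hub
    have hlc : liczba_cyfr x = (k : Int) + 1 := liczba_cyfr_eq x k (by omega) hklo hub'
    have hk1 : 1 ≤ k := by
      by_contra hne
      have hk0 : k = 0 := by omega
      rw [hk0] at hub'; norm_num at hub'; omega
    rw [rotacja_w_lewo]
    simp only [hlc]
    rw [if_neg (by push_cast; omega)]
    have htn : ((k : Int) + 1 - 1).toNat = k := by omega
    simp only [htn]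
    rw [hpo]

theorem altUpdate_none (o : Option Int) : altUpdate o none = o := by
  cases o <;> rfl

theorem altUpdate_some_some (bb be : Int) :
    altUpdate (some bb) (some be) = some (min bb be) := by
  simp only [altUpdate]
  split_ifs with h
  · rw [min_eq_left (by omega)]
  · rw [min_eq_right (by omega)]

theorem altUpdate_assoc (a b c : Option Int) :
    altUpdate a (altUpdate b c) = altUpdate (altUpdate a b) c := by
  rcases a with _ | av
  · rfl
  · rcases b with _ | bv
    · rfl
    · rcases c with _ | cv
      · rw [altUpdate_none, altUpdate_none]
      · simp only [altUpdate_some_some]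
        rw [min_assoc]

theorem alt_eq : ∀ (k : Nat) (x : Int) (best : Option Int),
    altOuter ((10 : Int) ^ k) x best =
      (budujRotacje x (k + 1)).foldl (fun be r => altUpdate (pierwsza_baza r) be) best := by
  intro k
  induction k with
  | zero =>
    intro x best
    rw [pow_zero, altOuter, dif_pos (by norm_num)]
    have h0 : PySem.Int.floordiv 1 10 = 0 := by decide
    rw [h0, altOuter, dif_neg (by norm_num)]
    simp [budujRotacje]
  | succ k ih =>
    intro x best
    have hpos : (1 : Int) ≤ 10 ^ (k + 1) := by
      have := pow_pos (show (0 : Int) < 10 by norm_num) (k + 1)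
      omega
    rw [altOuter, dif_pos hpos]
    have hdiv : PySem.Int.floordiv ((10 : Int) ^ (k + 1)) 10 = 10 ^ k := by
      rw [PySem.Int.floordiv_eq_ediv_of_pos (by norm_num), pow_succ]
      exact Int.mul_ediv_cancel _ (by norm_num)
    rw [hdiv, rot_eq x, ih]
    simp [budujRotacje]

theorem find?_or : ∀ (R : List Int), R.Pairwise (· < ·) → ∀ (f g : Int → Bool),
    R.find? (fun b => f b || g b) = altUpdate (R.find? g) (R.find? f) := by
  intro R
  induction R with
  | nil => intro _ f g; simp [altUpdate]
  | cons b R ih =>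
    intro hP f g
    have hlt : ∀ y ∈ R, b < y := (List.pairwise_cons.mp hP).1
    have hP' := (List.pairwise_cons.mp hP).2
    by_cases hf : f b = true
    · by_cases hg : g b = true
      · simp [List.find?_cons, hf, hg, altUpdate]
      · have hg' : g b = false := by simpa using hg
        cases hfind : R.find? g with
        | none => simp [List.find?_cons, hf, hg', hfind, altUpdate]
        | some y =>
          have hy : y ∈ R := List.mem_of_find?_eq_some hfind
          have hyb : ¬ y < b := by have := hlt y hy; omega
          simp [List.find?_cons, hf, hg', hfind, altUpdate, hyb]
    · have hf' : f b = false := by simpa using hf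
      by_cases hg : g b = true
      · cases hfind : R.find? f with
        | none => simp [List.find?_cons, hf', hg, hfind, altUpdate]
        | some y =>
          have hy : y ∈ R := List.mem_of_find?_eq_some hfind
          have hby : b < y := hlt y hy
          simp [List.find?_cons, hf', hg, hfind, altUpdate, hby]
      · have hg' : g b = false := by simpa using hg
        simp only [List.find?_cons, hf', hg', Bool.or_self, Bool.false_eq_true, if_false]
        exact ih hP' f g

theorem fold_min : ∀ (rots : List Int) (best : Option Int),
    rots.foldl (fun be r => altUpdate (pierwsza_baza r) be) best =
      altUpdate ((PySem.List.pyRange 2 17 1).find?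
        (fun bb => rots.any (fun r => ma_pierwszy_iloczyn r bb))) best := by
  intro rots
  induction rots with
  | nil =>
    intro best
    have h0 : (PySem.List.pyRange 2 17 1).find?
        (fun bb => ([] : List Int).any (fun r => ma_pierwszy_iloczyn r bb)) = none := by
      apply List.find?_eq_none.mpr
      intro b _; simp
    simp only [List.foldl_nil, h0, altUpdate]
  | cons r L ih =>
    intro best
    simp only [List.foldl_cons]
    rw [ih (altUpdate (pierwsza_baza r) best)]
    have hpb : pierwsza_baza r
        = (PySem.List.pyRange 2 17 1).find? (fun bb => ma_pierwszy_iloczyn r bb) :=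
      pierwszaGo_eq 15 r 2 (by decide)
    rw [hpb, altUpdate_assoc,
      ← find?_or (PySem.List.pyRange 2 17 1) (PySem.List.pairwise_lt_pyRange_one 2 17)
        (fun bb => ma_pierwszy_iloczyn r bb)
        (fun bb => L.any (fun rr => ma_pierwszy_iloczyn rr bb))]
    simp only [List.any_cons]

theorem find?_congr_mem (R : List Int) (p q : Int → Bool) (h : ∀ b ∈ R, p b = q b) :
    R.find? p = R.find? q := by
  induction R with
  | nil => rfl
  | cons b R ih =>
    simp only [List.find?_cons, h b (by simp)]
    by_cases hq : q b = true
    · simp [hq]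
    · have hq' : q b = false := by simpa using hq
      simp only [hq', Bool.false_eq_true, if_false]
      exact ih (fun x hx => h x (by simp [hx]))

theorem pvMaGo_neg (x b : Int) (hx : ¬ 0 < x) : pvMaGo x b 0 = false := by
  by_cases hb : b ≤ 1
  · rw [pvMaGo, dif_pos hb]; decide
  · rw [pvMaGo, dif_neg hb, dif_neg hx]; decide

-- ===== VERDICT (by name: the statement is the Claim_ definition above) =====
theorem Zadanie_57_spec : Claim_equal_Zadanie_57 := by
  intro N _
  show Zadanie_57 N = Zadanie_57_alt N
  rw [Zadanie_57, outer_eq 15 (liczba_cyfr N) N 2 (by decide)]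
  rw [find?_congr_mem _ _ (fun pb => (budujRotacje N (liczba_cyfr N).toNat).any
        (fun r => ma_pierwszy_iloczyn r pb))
      (by
        intro b hb
        have hbr := (PySem.List.mem_pyRange_one).mp hb
        have haux : (fun r => is_prime (iloczyn_cyfr r b))
            = (fun r => ma_pierwszy_iloczyn r b) :=
          funext fun r => test_eq r b (by omega) (by omega)
        rw [haux])]
  rw [Zadanie_57_alt]
  have main : ∀ (M : Int) (k : Nat), potegaGo 1 M = 10 ^ k → (liczba_cyfr M).toNat = k + 1 →
      (PySem.List.pyRange 2 17 1).find?
          (fun pb => (budujRotacje M (liczba_cyfr M).toNat).any (fun r => ma_pierwszy_iloczyn r pb))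
        = altOuter (potegaGo 1 M) M none := by
    intro M k hpo hlc
    rw [hlc, hpo, alt_eq k M none, fold_min, altUpdate_none]
  by_cases hN : 1 ≤ N
  · obtain ⟨k, hpo, hub, hlb⟩ := potega_spec N.toNat 1 N (by omega) le_rfl
    simp only [one_mul] at hpo hub hlb
    have hklo : (10 : Int) ^ k ≤ N := by
      rcases hlb with h | h
      · subst h; simpa using hN
      · exact h
    have hub' : N < 10 ^ (k + 1) := by rw [pow_succ]; exact hub
    have hlc : liczba_cyfr N = (k : Int) + 1 := liczba_cyfr_eq N k hN hklo hub'
    have htn : (liczba_cyfr N).toNat = k + 1 := by rw [hlc]; omega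
    exact main N k hpo htn
  · by_cases h0 : N = 0
    · subst h0
      refine main 0 0 ?_ ?_
      · rw [pow_zero, potegaGo, dif_neg (by norm_num)]
      · decide
    · have hlc0 : liczba_cyfr N = 0 := by
        rw [liczba_cyfr, if_neg (by simpa using h0), liczbaCyfrGo, dif_neg (by omega)]
      rw [hlc0, show ((0 : Int).toNat) = 0 from rfl]
      have hfun : (fun pb => (budujRotacje N 0).any (fun r => ma_pierwszy_iloczyn r pb))
          = fun _ : Int => false := by
        funext pb; simp [budujRotacje]
      rw [hfun]
      have hL : (PySem.List.pyRange 2 17 1).find? (fun _ : Int => false) = none :=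
        List.find?_eq_none.mpr (fun x _ => by simp)
      rw [hL]
      have hp0 : potegaGo 1 N = 10 ^ 0 := by
        rw [pow_zero, potegaGo, dif_neg (by omega)]
      rw [hp0, alt_eq 0 N none, fold_min, altUpdate_none]
      symm
      apply List.find?_eq_none.mpr
      intro b _
      simp only [budujRotacje, List.any_cons, List.any_nil, Bool.or_false]
      rw [ma_pierwszy_iloczyn, pvMaGo_neg N b (by omega)]
      simp
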